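-- pv_equiv track=rewrite | github.com/SandorMore/leetCodePython | LengthOfStringAfterTransformation.py | lengthOfStuff
-- ===== SOURCE A (Python) =====
-- def lengthOfStuff(s: str, t: int) -> int:
--     MOD = 10**9 + 7
--
--     def compute_contribution(char: str, t: int) -> int:
--         position = ord('z') - ord(char)
--
--         if t <= position:
--             return 1
--
--         return pow(2, t - position, MOD)
--
--
--     total_length = 0
--     for char in s:
--         total_length += compute_contribution(char, t)
--         total_length %= MOD
--
--     return total_length
-- ===== SOURCE B (Python) =====
-- def lengthOfStuff(s: str, t: int) -> int:
--     MOD = 10**9 + 7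
--
--     freq = {}
--     for ch in s:
--         freq[ch] = freq.get(ch, 0) + 1
--
--     total = 0
--     for ch, cnt in freq.items():
--         pos = ord('z') - ord(ch)
--         contrib = 1 if t <= pos else pow(2, t - pos, MOD)
--         total += cnt * contrib
--     return total % MOD
-- ===== Notes on version B (the rewrite author's own statement) =====
-- stated objective: faster
-- what changed: B builds a frequency table of the distinct characters once and computes each character's modular contribution a single time, multiplying by its count, instead of recomputing pow(2, t-pos, MOD) for every character of s.
import Mathlib
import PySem

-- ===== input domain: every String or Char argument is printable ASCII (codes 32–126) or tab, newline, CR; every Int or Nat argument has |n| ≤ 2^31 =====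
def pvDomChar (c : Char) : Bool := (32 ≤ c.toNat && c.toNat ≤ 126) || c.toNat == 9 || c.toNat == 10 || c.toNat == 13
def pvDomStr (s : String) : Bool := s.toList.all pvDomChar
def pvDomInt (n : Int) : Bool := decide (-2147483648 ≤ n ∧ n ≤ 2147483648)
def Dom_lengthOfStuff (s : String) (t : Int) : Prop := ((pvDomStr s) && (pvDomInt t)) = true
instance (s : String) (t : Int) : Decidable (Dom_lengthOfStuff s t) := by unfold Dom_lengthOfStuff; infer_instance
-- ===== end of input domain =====

-- B counts each distinct character once and computes its modular contribution a single
-- time (multiplied by its frequency), instead of recomputing pow for every character of s.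

-- ===== PORT A =====
-- helper: A's inner 'compute_contribution'.  In the else-branch t > position, so
-- t - position ≥ 1 and '(t - position).toNat' is exact for Python's pow(2, t-position, MOD).
def pvComputeContribution (char : Char) (t : Int) : Int :=
  let MOD : Int := 10 ^ 9 + 7
  let position : Int := 122 - (char.toNat : Int)
  if t ≤ position then 1 else PySem.Int.powMod 2 (t - position).toNat MOD

def lengthOfStuff (s : String) (t : Int) : Int :=
  let MOD : Int := 10 ^ 9 + 7
  s.toList.foldl (fun total char => PySem.Int.mod (total + pvComputeContribution char t) MOD) 0

-- ===== PORT B =====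
def lengthOfStuff_alt (s : String) (t : Int) : Int :=
  let MOD : Int := 10 ^ 9 + 7
  let freq : PySem.Dict Char Int :=
    s.toList.foldl (fun d ch => d.insert ch (d.getD ch 0 + 1)) PySem.Dict.empty
  let total : Int :=
    freq.items.foldl (fun acc p =>
      let pos : Int := 122 - (p.1.toNat : Int)
      let contrib : Int := if t ≤ pos then 1 else PySem.Int.powMod 2 (t - pos).toNat MOD
      acc + p.2 * contrib) 0
  PySem.Int.mod total MOD

-- ===== PRECONDITION & SPEC =====
def Spec_lengthOfStuff (s : String) (t : Int) (out : Int) : Prop := out = lengthOfStuff_alt s t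
instance (s : String) (t : Int) (out : Int) : Decidable (Spec_lengthOfStuff s t out) := by unfold Spec_lengthOfStuff; infer_instance

-- ===== CLAIM (what is proved, stated in full; the proofs are below) =====
def Claim_equal_lengthOfStuff : Prop := ∀ (s : String) (t : Int), Dom_lengthOfStuff s t → Spec_lengthOfStuff s t (lengthOfStuff s t)

-- ===== LEMMAS AND PROOFS =====

-- A's loop: adding and reducing mod M at every step is reduction of the plain sum.
theorem pvFoldModA (f : Char → Int) (M : Int) (l : List Char) (a : Int) :
    l.foldl (fun acc c => (acc + f c) % M) (a % M) = (a + (l.map f).sum) % M := by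
  induction l generalizing a with
  | nil => simp
  | cons c l ih =>
    have h1 : (a % M + f c) % M = (a + f c) % M := Int.emod_add_emod a M (f c)
    calc (c :: l).foldl (fun acc c => (acc + f c) % M) (a % M)
        = l.foldl (fun acc c => (acc + f c) % M) ((a + f c) % M) := by
          simp only [List.foldl_cons, h1]
      _ = ((a + f c) + (l.map f).sum) % M := ih (a + f c)
      _ = (a + ((c :: l).map f).sum) % M := by
          simp only [List.map_cons, List.sum_cons]; ring_nf

-- summing each distinct character's contribution times its multiplicity is the plain sum
theorem pvCountSum (f : Char → Int) (l : List Char) :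
    ((PySem.Set.ofList l).map (fun k => (l.count k : Int) * f k)).sum = (l.map f).sum := by
  have hfin : (PySem.Set.ofList l).toFinset = l.toFinset := by
    ext x; simp [PySem.Set.mem_ofList]
  calc ((PySem.Set.ofList l).map (fun k => (l.count k : Int) * f k)).sum
      = (PySem.Set.ofList l).toFinset.sum (fun k => (l.count k : Int) * f k) :=
        (List.sum_toFinset _ (PySem.Set.nodup_ofList l)).symm
    _ = l.toFinset.sum (fun k => (l.count k : Int) * f k) := by rw [hfin]
    _ = l.toFinset.sum (fun k => l.count k • f k) := by
        refine Finset.sum_congr rfl fun k _ => ?_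
        simp
    _ = (l.map f).sum := (Finset.sum_list_map_count l f).symm

-- ===== VERDICT (by name: the statement is the Claim_ definition above) =====
theorem lengthOfStuff_spec : Claim_equal_lengthOfStuff := by
  intro s t _
  have hMpos : (0 : Int) < 10 ^ 9 + 7 := by norm_num
  set f : Char → Int := fun c => pvComputeContribution c t with hf
  show (s.toList.foldl
      (fun total char => PySem.Int.mod (total + pvComputeContribution char t) (10 ^ 9 + 7)) 0)
    = PySem.Int.mod
      ((s.toList.foldl (fun d ch => d.insert ch (d.getD ch 0 + 1))
          (PySem.Dict.empty : PySem.Dict Char Int)).items.foldl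
        (fun acc p =>
          let pos : Int := 122 - (p.1.toNat : Int)
          let contrib : Int :=
            if t ≤ pos then 1 else PySem.Int.powMod 2 (t - pos).toNat (10 ^ 9 + 7)
          acc + p.2 * contrib) 0) (10 ^ 9 + 7)
  -- A's side: replace PySem.Int.mod by % and close the fold
  have hA : s.toList.foldl
      (fun total char => PySem.Int.mod (total + pvComputeContribution char t) (10 ^ 9 + 7)) 0
      = (s.toList.map f).sum % (10 ^ 9 + 7) := by
    have h0 : s.toList.foldl
        (fun total char => PySem.Int.mod (total + pvComputeContribution char t) (10 ^ 9 + 7)) 0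
        = s.toList.foldl (fun acc c => (acc + f c) % (10 ^ 9 + 7)) ((0 : Int) % (10 ^ 9 + 7)) := by
      rw [Int.zero_emod]
      exact PySem.List.foldl_congr_mem _ _ _ _
        (fun acc x _ => PySem.Int.mod_eq_emod_of_pos hMpos)
    rw [h0, pvFoldModA, zero_add]
  -- B's side: the frequency loop is Counter; its items pair each distinct char with its count
  have hB : (s.toList.foldl (fun d ch => d.insert ch (d.getD ch 0 + 1))
        (PySem.Dict.empty : PySem.Dict Char Int)).items.foldl
        (fun acc p =>
          let pos : Int := 122 - (p.1.toNat : Int)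
          let contrib : Int :=
            if t ≤ pos then 1 else PySem.Int.powMod 2 (t - pos).toNat (10 ^ 9 + 7)
          acc + p.2 * contrib) 0
      = (s.toList.map f).sum := by
    rw [PySem.Dict.foldl_insert_getD_add_one_eq_counter, PySem.Dict.items_counter]
    have hstep : ((PySem.Set.ofList s.toList).map
          (fun k => (k, (s.toList.count k : Int)))).foldl
        (fun acc p =>
          let pos : Int := 122 - (p.1.toNat : Int)
          let contrib : Int :=
            if t ≤ pos then 1 else PySem.Int.powMod 2 (t - pos).toNat (10 ^ 9 + 7)
          acc + p.2 * contrib) 0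
        = ((PySem.Set.ofList s.toList).map
          (fun k => (k, (s.toList.count k : Int)))).foldl
        (fun acc p => acc + (fun (q : Char × Int) => q.2 * f q.1) p) 0 := by
      refine PySem.List.foldl_congr_mem _ _ _ _ (fun acc p _ => ?_)
      simp only [hf, pvComputeContribution]
    rw [hstep, PySem.List.foldl_add (β := Char × Int) _ (fun q => q.2 * f q.1) 0, zero_add, List.map_map]
    exact pvCountSum f s.toList
  rw [hA, hB, PySem.Int.mod_eq_emod_of_pos hMpos]
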